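-- pv_equiv track=rewrite | github.com/lium-lst/nmtpytorch | nmtpytorch/layers/encoders/image.py | get_vgg_names
-- ===== SOURCE A (Python) =====
-- def get_vgg_names(config, batch_norm=False):
--     names = []
--
--     # Counters for layer naming
--     n_block, n_conv = 1, 1
--
--     for v in config:
--         if v == 'M':
--             names.append('pool%d' % n_block)
--             n_block += 1
--             n_conv = 1
--         else:
--             conv_name = 'conv%d_%d' % (n_block, n_conv)
--             names.append(conv_name)
--             if batch_norm:
--                 names.append('%s+bn' % conv_name)
--                 names.append('%s+bn+relu' % conv_name)
--             else:
--                 names.append('%s+relu' % conv_name)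
--
--             n_conv += 1
--
--     return names
-- ===== SOURCE B (Python) =====
-- from itertools import groupby
--
-- def get_vgg_names(config, batch_norm=False):
--     names = []
--     n_block = 1
--     for is_pool, group in groupby(config, key=lambda v: v == 'M'):
--         if is_pool:
--             for _ in group:
--                 names.append('pool%d' % n_block)
--                 n_block += 1
--         else:
--             for i, _ in enumerate(group, 1):
--                 conv = 'conv%d_%d' % (n_block, i)
--                 if batch_norm:
--                     names.extend([conv, conv + '+bn', conv + '+bn+relu'])
--                 else:
--                     names.extend([conv, conv + '+relu'])
--     return names
-- ===== Notes on version B (the rewrite author's own statement) =====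
-- stated objective: alternative
-- what changed: Replaces A's single loop carrying (n_block, n_conv) counters by an itertools.groupby decomposition into maximal runs of 'M' and non-'M' markers, emitting each run's names as a block (pools advance n_block per 'M'; convs are enumerated 1..N within the run).
import Mathlib
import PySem

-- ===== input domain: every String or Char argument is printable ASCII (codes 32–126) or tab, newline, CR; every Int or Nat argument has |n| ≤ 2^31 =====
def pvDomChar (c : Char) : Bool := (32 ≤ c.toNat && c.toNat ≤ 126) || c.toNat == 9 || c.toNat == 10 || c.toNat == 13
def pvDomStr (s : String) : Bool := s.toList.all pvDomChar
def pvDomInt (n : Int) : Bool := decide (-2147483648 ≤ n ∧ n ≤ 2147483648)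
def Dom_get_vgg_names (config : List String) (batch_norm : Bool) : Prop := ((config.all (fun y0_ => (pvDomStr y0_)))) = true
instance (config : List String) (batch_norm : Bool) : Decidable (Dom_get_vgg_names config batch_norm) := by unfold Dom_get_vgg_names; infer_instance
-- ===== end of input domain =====

-- ===== PORT A =====
-- ===== PORT A =====
-- B replaces A's single stateful loop (n_block, n_conv counters) by a groupby
-- decomposition into runs; return values are proved equal on all inputs.
def pvAStep (batch_norm : Bool) (st : List String × Int × Int) (v : String) : List String × Int × Int :=
  let (names, nb, nc) := st
  if v == "M" then
    (names ++ ["pool" ++ PySem.Int.toStr nb], nb + 1, 1)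
  else
    let conv_name := "conv" ++ PySem.Int.toStr nb ++ "_" ++ PySem.Int.toStr nc
    let names := names ++ [conv_name]
    let names :=
      if batch_norm then names ++ [conv_name ++ "+bn", conv_name ++ "+bn+relu"]
      else names ++ [conv_name ++ "+relu"]
    (names, nb, nc + 1)

def get_vgg_names (config : List String) (batch_norm : Bool) : List String :=
  (config.foldl (pvAStep batch_norm) ([], 1, 1)).1

-- ===== PORT B =====
-- names for one maximal run of "M" markers: one pool per 'M', block counter advances
def pvPoolRun (run : List String) (nb : Int) : List String :=
  match run with
  | [] => []
  | _ :: t => ("pool" ++ PySem.Int.toStr nb) :: pvPoolRun t (nb + 1)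

-- names for one maximal run of conv markers, enumerated from i inside block nb
def pvConvRun (run : List String) (nb i : Int) (batch_norm : Bool) : List String :=
  match run with
  | [] => []
  | _ :: t =>
    let conv := "conv" ++ PySem.Int.toStr nb ++ "_" ++ PySem.Int.toStr i
    (if batch_norm then [conv, conv ++ "+bn", conv ++ "+bn+relu"]
     else [conv, conv ++ "+relu"]) ++ pvConvRun t nb (i + 1) batch_norm

def pvAltGo (l : List String) (nb : Int) (batch_norm : Bool) : List String :=
  match h : l with
  | [] => []
  | v :: _ =>
    if v == "M" then
      let run := l.takeWhile (fun x => x == "M")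
      pvPoolRun run nb ++ pvAltGo (l.dropWhile (fun x => x == "M")) (nb + run.length) batch_norm
    else
      let run := l.takeWhile (fun x => x != "M")
      pvConvRun run nb 1 batch_norm ++ pvAltGo (l.dropWhile (fun x => x != "M")) nb batch_norm
termination_by l.length
decreasing_by
  all_goals subst h
  all_goals simp only [List.dropWhile, List.length_cons]
  all_goals split
  all_goals simp_all [List.length_dropWhile_le]

def get_vgg_names_alt (config : List String) (batch_norm : Bool) : List String :=
  pvAltGo config 1 batch_norm

-- ===== PRECONDITION & SPEC =====
def Spec_get_vgg_names (config : List String) (batch_norm : Bool) (out : List String) : Prop := out = get_vgg_names_alt config batch_norm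
instance (config : List String) (batch_norm : Bool) (out : List String) : Decidable (Spec_get_vgg_names config batch_norm out) := by unfold Spec_get_vgg_names; infer_instance

-- ===== CLAIM (what is proved, stated in full; the proofs are below) =====
def Claim_equal_get_vgg_names : Prop := ∀ (config : List String) (batch_norm : Bool), Dom_get_vgg_names config batch_norm → Spec_get_vgg_names config batch_norm (get_vgg_names config batch_norm)

-- ===== LEMMAS AND PROOFS =====

-- direct cons-form of A's loop result (proof-only intermediate)
def pvEmit (l : List String) (nb nc : Int) (batch_norm : Bool) : List String :=
  match l with
  | [] => []
  | v :: t =>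
    if v == "M" then ("pool" ++ PySem.Int.toStr nb) :: pvEmit t (nb + 1) 1 batch_norm
    else
      let conv := "conv" ++ PySem.Int.toStr nb ++ "_" ++ PySem.Int.toStr nc
      (if batch_norm then [conv, conv ++ "+bn", conv ++ "+bn+relu"]
       else [conv, conv ++ "+relu"]) ++ pvEmit t nb (nc + 1) batch_norm

lemma foldl_eq_emit (bn : Bool) : ∀ (l : List String) (names : List String) (nb nc : Int),
    (l.foldl (pvAStep bn) (names, nb, nc)).1 = names ++ pvEmit l nb nc bn := by
  intro l
  induction l with
  | nil => intro names nb nc; simp [pvEmit]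
  | cons v t ih =>
    intro names nb nc
    simp only [List.foldl, pvAStep, pvEmit]
    by_cases h : v = "M"
    · simp [h, ih]
    · have h' : (v == "M") = false := by simp [h]
      simp only [h']
      cases bn <;> simp [ih]

lemma emit_Mrun (bn : Bool) : ∀ (l : List String) (nb : Int),
    pvEmit l nb 1 bn =
      pvPoolRun (l.takeWhile (fun x => x == "M")) nb ++
        pvEmit (l.dropWhile (fun x => x == "M")) (nb + (l.takeWhile (fun x => x == "M")).length) 1 bn := by
  intro l
  induction l with
  | nil => intro nb; simp [pvPoolRun]
  | cons v t ih =>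
    intro nb
    by_cases h : v = "M"
    · simp only [h, pvEmit, List.takeWhile, List.dropWhile, BEq.rfl, if_true, pvPoolRun, List.length_cons]
      rw [ih (nb + 1)]
      simp
      ring_nf
    · have h' : (v == "M") = false := by simp [h]
      simp [List.takeWhile, List.dropWhile, h', pvPoolRun]

lemma emit_convrun (bn : Bool) : ∀ (l : List String) (nb nc : Int),
    pvEmit l nb nc bn =
      pvConvRun (l.takeWhile (fun x => x != "M")) nb nc bn ++
        pvEmit (l.dropWhile (fun x => x != "M")) nb 1 bn := by
  intro l
  induction l with
  | nil => intro nb nc; simp [pvConvRun, pvEmit]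
  | cons v t ih =>
    intro nb nc
    by_cases h : v = "M"
    · have h' : (v != "M") = false := by simp [h]
      simp only [List.takeWhile, List.dropWhile, h', pvConvRun, List.nil_append]
      simp [pvEmit, h]
    · have h' : (v != "M") = true := by simp [h]
      have h2 : (v == "M") = false := by simp [h]
      simp only [List.takeWhile, List.dropWhile, h', pvConvRun, pvEmit, h2]
      rw [ih nb (nc + 1)]
      simp

lemma altGo_eq_emit : ∀ (l : List String) (nb : Int) (bn : Bool),
    pvAltGo l nb bn = pvEmit l nb 1 bn := by
  intro l nb bn
  induction l, nb using pvAltGo.induct with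
  | case1 nb => simp [pvAltGo, pvEmit]
  | case2 nb v t hM run ih =>
    rw [pvAltGo]
    simp only [hM, if_true]
    rw [ih, ← emit_Mrun]
  | case3 nb v t hM ih =>
    rw [pvAltGo, if_neg hM, ih, ← emit_convrun]

-- ===== VERDICT (by name: the statement is the Claim_ definition above) =====
theorem get_vgg_names_spec : Claim_equal_get_vgg_names := by
  intro config bn _
  unfold Spec_get_vgg_names get_vgg_names get_vgg_names_alt
  rw [foldl_eq_emit, altGo_eq_emit]
  simp
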